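-- pv_equiv track=rewrite | github.com/ClayRitterson/Custom-Cipher | CustomCipher2.py | unJo
-- ===== SOURCE A (Python) =====
-- def unJo(unscrambleCode, trueList):
--     truePos = []
--     num = len(unscrambleCode)
--     codeList = []
--     for i in range(len(unscrambleCode)):
--         codeList.append(unscrambleCode[i])
--     for i in range(num):
--         curNum = num - i
--         bit = highestBit(curNum)[0]
--         pos = position(bit, curNum)
--         actualPos = countBodies(trueList, pos)
--         trueList[actualPos] = 0
--         truePos.append(actualPos + 1)
--     finalCode = ''
--     for i in range(len(truePos)):
--         q = i + 1
--         for j in range(len(truePos)):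
--             if truePos[j] == q:
--                 finalCode += codeList[j]
--     return finalCode
--
-- def countBodies(trueList, pos):
--     numBodies = 0
--     trueFound = 0
--     x = 0
--     while trueFound < pos:
--         checkBody = trueList[x]
--         if checkBody == 0:
--             numBodies += 1
--         elif checkBody != 0:
--             trueFound += 1
--         x += 1
--     return x - 1
--
-- def highestBit(num):
--     n = 0
--     found = True
--     while found:
--         curBit = 2**n
--         if curBit > num:
--             break
--         else:
--             n += 1
--     return (curBit//2), n
--
-- def position(bit, num):
--     remainder = num % bit
--     pos = 1 + (remainder*2)
--     return pos
-- ===== SOURCE B (Python) =====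
-- # B: one pass with an explicit list of live indices and direct placement into an
-- # output array (A's countBodies zero-marker scan and its quadratic final
-- # gather loop disappear). Note: unlike A, B does not mutate trueList in place.
-- def unJo(unscrambleCode, trueList):
--     n = len(unscrambleCode)
--     alive = [i for i, v in enumerate(trueList) if v != 0]
--     res = [None] * n
--     for i in range(n):
--         cur = n - i
--         bit = 1 << (cur.bit_length() - 1)
--         pos = 1 + 2 * (cur - bit)
--         t = alive.pop(pos - 1)
--         if t < n:
--             res[t] = unscrambleCode[i]
--     return ''.join(c for c in res if c is not None)
-- ===== Notes on version B (the rewrite author's own statement) =====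
-- stated objective: faster
-- what changed: B keeps a list of live trueList indices and pops the selected one each round, placing each character directly at its target slot in a preallocated output array, instead of A's per-round rescan of the zero-marked trueList (countBodies) and the quadratic final double loop that gathers characters by matching positions.
import Mathlib
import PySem

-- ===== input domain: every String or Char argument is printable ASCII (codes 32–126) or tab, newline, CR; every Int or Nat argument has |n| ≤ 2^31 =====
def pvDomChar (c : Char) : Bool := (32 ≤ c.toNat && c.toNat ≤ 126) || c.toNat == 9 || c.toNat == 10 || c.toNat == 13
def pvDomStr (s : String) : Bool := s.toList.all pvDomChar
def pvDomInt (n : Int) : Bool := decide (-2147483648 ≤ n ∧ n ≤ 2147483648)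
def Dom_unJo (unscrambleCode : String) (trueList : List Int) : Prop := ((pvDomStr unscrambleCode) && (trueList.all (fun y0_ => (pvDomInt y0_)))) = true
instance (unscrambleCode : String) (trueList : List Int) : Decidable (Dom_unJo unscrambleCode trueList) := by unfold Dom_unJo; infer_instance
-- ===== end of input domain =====

-- B replaces A's zero-marker rescans and quadratic final gather by a live-index list and
-- direct placement into an output array (return value only: A also zeroes trueList in place, B does not mutate it).

-- ===== PORT A =====
-- while loop of highestBit: n increments while 2**n <= num; fuel num.toNat+1 only for
-- termination (2^k > k, so the loop always breaks within that many passes)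
def hbLoop (num : Int) : Nat → Nat → Int × Int
  | n, 0 => (PySem.Int.floordiv ((2:Int) ^ n) 2, (n : Int))
  | n, fuel + 1 =>
    if (2:Int) ^ n > num then (PySem.Int.floordiv ((2:Int) ^ n) 2, (n : Int))
    else hbLoop num (n + 1) fuel

def highestBit (num : Int) : Int × Int := hbLoop num 0 (num.toNat + 1)

def position (bit num : Int) : Int := 1 + (PySem.Int.mod num bit) * 2

-- while loop of countBodies: x marches through trueList via pyGet? (none = IndexError);
-- fuel trueList.length+1 only for termination: each pass reads a fresh index, so the
-- fuel-exhausted branch is reached only when the read at x would fail anyway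
def cbLoop (trueList : List Int) (pos : Int) : Int → Int → Int → Nat → Option Int
  | _, trueFound, x, 0 => if trueFound < pos then none else some (x - 1)
  | numBodies, trueFound, x, fuel + 1 =>
    if trueFound < pos then
      match PySem.List.pyGet? trueList x with
      | none => none
      | some checkBody =>
        if checkBody = 0 then cbLoop trueList pos (numBodies + 1) trueFound (x + 1) fuel
        else cbLoop trueList pos numBodies (trueFound + 1) (x + 1) fuel
    else some (x - 1)

def countBodies (trueList : List Int) (pos : Int) : Option Int :=
  cbLoop trueList pos 0 0 0 (trueList.length + 1)

-- A's main for-loop; threads the mutated trueList, returns truePos (none = IndexError);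
-- the set index actualPos is the index countBodies just read, hence nonneg and in range
def unJoLoop (num : Int) : List Int → List Int → Int → Nat → Option (List Int)
  | _, truePos, _, 0 => some truePos
  | trueList, truePos, i, cnt + 1 =>
    let curNum := num - i
    let bit := (highestBit curNum).1
    let pos := position bit curNum
    match countBodies trueList pos with
    | none => none
    | some actualPos =>
      unJoLoop num (trueList.set actualPos.toNat 0) (truePos ++ [actualPos + 1]) (i + 1) cnt

def unJo (unscrambleCode : String) (trueList : List Int) : String :=
  let cs := unscrambleCode.toList
  let num : Int := cs.length
  let codeList : List Char := (List.range cs.length).foldl (fun acc i => acc ++ [cs.getD i ' ']) []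
  match unJoLoop num trueList [] 0 cs.length with
  | none => ""  -- Python raises IndexError here: outside Pre_
  | some truePos =>
    let finalCode : List Char :=
      (List.range truePos.length).foldl (fun (acc : List Char) (i : Nat) =>
        (List.range truePos.length).foldl (fun (acc2 : List Char) (j : Nat) =>
          if truePos.getD j 0 = (i : Int) + 1 then acc2 ++ [codeList.getD j ' '] else acc2) acc) []
    String.mk finalCode

-- ===== PORT B =====
-- B's for-loop: pop the chosen live index, place the i-th char directly at it
def altLoop (cs : List Char) (n : Nat) : List Int → List (Option Char) → Nat → Nat → List (Option Char)
  | _, res, _, 0 => res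
  | alive, res, i, cnt + 1 =>
    let cur : Int := (n : Int) - (i : Int)
    let bit : Int := 2 ^ (PySem.Int.bitLength cur - 1)
    let pos : Int := 1 + 2 * (cur - bit)
    match PySem.List.pop? alive (pos - 1) with
    | none => res  -- Python B raises IndexError here: outside Pre_
    | some (t, alive') =>
      altLoop cs n alive' (if t < (n : Int) then res.set t.toNat (some (cs.getD i ' ')) else res) (i + 1) cnt

def unJo_alt (unscrambleCode : String) (trueList : List Int) : String :=
  let cs := unscrambleCode.toList
  let n := cs.length
  let alive : List Int := ((PySem.List.enumerate trueList 0).filter (fun p => p.2 ≠ 0)).map (fun p => p.1)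
  let res := altLoop cs n alive (List.replicate n (none : Option Char)) 0 n
  String.mk (res.foldl (fun acc o => match o with | some c => acc ++ [c] | none => acc) [])

-- ===== PRECONDITION & SPEC =====
-- Pre_ excludes exactly the inputs on which A raises IndexError in countBodies:
-- A returns normally iff trueList holds at least len(unscrambleCode) nonzero entries.
def Pre_unJo (unscrambleCode : String) (trueList : List Int) : Prop :=
  unscrambleCode.toList.length ≤ (trueList.filter (fun v => v ≠ 0)).length
instance (unscrambleCode : String) (trueList : List Int) : Decidable (Pre_unJo unscrambleCode trueList) := by
  unfold Pre_unJo; infer_instance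

def pvWitness_unJo : String × List Int := ("ba", [3, 5])

def Spec_unJo (unscrambleCode : String) (trueList : List Int) (out : String) : Prop := out = unJo_alt unscrambleCode trueList
instance (unscrambleCode : String) (trueList : List Int) (out : String) : Decidable (Spec_unJo unscrambleCode trueList out) := by unfold Spec_unJo; infer_instance

-- ===== CLAIM (what is proved, stated in full; the proofs are below) =====
def Claim_equal_unJo : Prop := ∀ (unscrambleCode : String) (trueList : List Int), Dom_unJo unscrambleCode trueList → Pre_unJo unscrambleCode trueList → Spec_unJo unscrambleCode trueList (unJo unscrambleCode trueList)

-- ===== LEMMAS AND PROOFS =====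

-- indices (from offset k) of the nonzero entries of a list
def aliveIdx : List Int → Int → List Int
  | [], _ => []
  | v :: l, k => if v ≠ 0 then k :: aliveIdx l (k + 1) else aliveIdx l (k + 1)

-- reference selection: the sequence of trueList-indices picked by the n rounds
def sel : List Int → Nat → List Int
  | _, 0 => []
  | alive, c + 1 =>
    let idx := 2 * ((c + 1) - 2 ^ Nat.log2 (c + 1))
    if h : idx < alive.length then alive[idx] :: sel (alive.eraseIdx idx) c else []

-- reference placement: put the chars at the picked indices (B's res array)
def place (n : Nat) (cs : List Char) : List (Option Char) → List Int → Nat → List (Option Char)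
  | res, [], _ => res
  | res, t :: ts, i =>
    place n cs (if t < (n : Int) then res.set t.toNat (some (cs.getD i ' ')) else res) ts (i + 1)

-- abstract countBodies loop over the unread suffix
def cbScan : List Int → Int → Int → Int → Option Int
  | [], pos, trueFound, x => if trueFound < pos then none else some (x - 1)
  | v :: l', pos, trueFound, x =>
    if trueFound < pos then
      (if v = 0 then cbScan l' pos trueFound (x + 1) else cbScan l' pos (trueFound + 1) (x + 1))
    else some (x - 1)

theorem aliveIdx_length (l : List Int) (k : Int) :
    (aliveIdx l k).length = (l.filter (fun v => v ≠ 0)).length := by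
  induction l generalizing k with
  | nil => rfl
  | cons v l ih => by_cases h : v = 0 <;> simp [aliveIdx, h, List.filter, ih]

theorem aliveIdx_le (l : List Int) (k : Int) : ∀ t ∈ aliveIdx l k, k ≤ t := by
  induction l generalizing k with
  | nil => simp [aliveIdx]
  | cons v l ih =>
    intro t ht
    by_cases h : v = 0 <;> simp [aliveIdx, h] at ht
    · have := ih (k + 1) t ht; omega
    · rcases ht with rfl | ht
      · omega
      · have := ih (k + 1) t ht; omega

theorem aliveIdx_pairwise (l : List Int) (k : Int) : (aliveIdx l k).Pairwise (· < ·) := by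
  induction l generalizing k with
  | nil => simp [aliveIdx]
  | cons v l ih =>
    by_cases h : v = 0 <;> simp [aliveIdx, h]
    · exact ih (k + 1)
    · exact ⟨fun t ht => by have := aliveIdx_le l (k + 1) t ht; omega, ih (k + 1)⟩

theorem enum_alive (l : List Int) (s : Int) :
    ((PySem.List.enumerate l s).filter (fun p => p.2 ≠ 0)).map (fun p => p.1) = aliveIdx l s := by
  induction l generalizing s with
  | nil => simp [PySem.List.enumerate_nil, aliveIdx]
  | cons v l ih =>
    by_cases h : v = 0 <;>
      simp [PySem.List.enumerate_cons, aliveIdx, h] <;> simpa using ih (s + 1)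

theorem aliveIdx_set (l : List Int) (x : Int) (p : Nat) (hp : p < (aliveIdx l x).length) :
    aliveIdx (l.set ((aliveIdx l x)[p] - x).toNat 0) x = (aliveIdx l x).eraseIdx p := by
  induction l generalizing x p with
  | nil => simp [aliveIdx] at hp
  | cons v l ih =>
    by_cases h : v = 0
    · simp only [aliveIdx, h, ne_eq, not_true_eq_false, if_false] at hp ⊢
      have hle := aliveIdx_le l (x + 1) (aliveIdx l (x + 1))[p] (List.getElem_mem hp)
      have htn : ((aliveIdx l (x + 1))[p] - x).toNat = ((aliveIdx l (x + 1))[p] - (x + 1)).toNat + 1 := by omega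
      rw [htn, List.set_cons_succ, aliveIdx, if_neg (by simp), ih (x + 1) p hp]
    · simp only [aliveIdx, h, ne_eq, not_false_eq_true, if_true] at hp ⊢
      cases p with
      | zero =>
        simp only [List.getElem_cons_zero, sub_self, Int.toNat_zero, List.set_cons_zero,
          List.eraseIdx_cons_zero]
        rw [aliveIdx, if_neg (by simp)]
      | succ q =>
        simp only [List.getElem_cons_succ, List.length_cons] at hp ⊢
        have hq : q < (aliveIdx l (x + 1)).length := by omega
        have hle := aliveIdx_le l (x + 1) (aliveIdx l (x + 1))[q] (List.getElem_mem hq)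
        have htn : ((aliveIdx l (x + 1))[q] - x).toNat = ((aliveIdx l (x + 1))[q] - (x + 1)).toNat + 1 := by omega
        rw [htn, List.set_cons_succ, List.eraseIdx_cons_succ, aliveIdx, if_pos (by simp [h]),
          ih (x + 1) q hq]

theorem cbLoop_eq_cbScan (l : List Int) (pos nb tf : Int) (x fuel : Nat)
    (hf : l.length - x < fuel) :
    cbLoop l pos nb tf (x : Int) fuel = cbScan (l.drop x) pos tf (x : Int) := by
  induction fuel generalizing nb tf x with
  | zero => omega
  | succ fuel ih =>
    rw [cbLoop]
    by_cases hc : tf < pos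
    · simp only [hc, if_true]
      rcases hd : l.drop x with _ | ⟨v, rest⟩
      · have hx : l.length ≤ x := by
          have := List.drop_eq_nil_iff.1 hd; omega
        rw [show PySem.List.pyGet? l (x : Int) = none by
          simp [PySem.List.pyGet?_natCast, List.getElem?_eq_none hx]]
        rw [cbScan, if_pos hc]
      · have hx : x < l.length := by
          by_contra hxx
          rw [List.drop_eq_nil_iff.2 (by omega)] at hd; cases hd
        have hget : l[x]? = some v := by
          have : (l.drop x)[0]? = some v := by rw [hd]; rfl
          rwa [List.getElem?_drop, Nat.add_zero] at this
        rw [show PySem.List.pyGet? l (x : Int) = some v by simp [PySem.List.pyGet?_natCast, hget],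
          cbScan, if_pos hc]
        have hrest : rest = l.drop (x + 1) := by
          have : (l.drop x).tail = l.drop (x + 1) := by rw [List.tail_drop]
          rw [hd] at this; simpa using this
        simp only [hrest]
        by_cases hv : v = 0
        · simp only [hv]
          have := ih (nb + 1) tf (x + 1) (by omega)
          push_cast at this ⊢
          exact this
        · simp only [if_neg hv]
          have := ih nb (tf + 1) (x + 1) (by omega)
          exact this
    · rcases l.drop x with _ | ⟨v, rest⟩ <;> simp [cbScan, hc]

theorem cbScan_alive (l : List Int) (x tf : Int) (p : Nat) (hp : p < (aliveIdx l x).length) :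
    cbScan l (tf + p + 1) tf x = some (aliveIdx l x)[p] := by
  induction l generalizing x tf p with
  | nil => simp [aliveIdx] at hp
  | cons v l ih =>
    rw [cbScan, if_pos (by omega)]
    by_cases hv : v = 0
    · simp only [aliveIdx, hv, ne_eq, not_true_eq_false, if_false] at hp ⊢
      rw [if_true]
      exact ih (x + 1) tf p hp
    · simp only [aliveIdx, hv, ne_eq, not_false_eq_true, if_true] at hp ⊢
      rw [if_false]
      cases p with
      | zero =>
        rcases l with _ | ⟨w, l'⟩ <;> · rw [cbScan, if_neg (by omega)]; simp
      | succ q =>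
        simp only [List.length_cons] at hp
        have := ih (x + 1) (tf + 1) q (by omega)
        rw [show tf + (q + 1 : Nat) + 1 = (tf + 1) + q + 1 by push_cast; ring]
        simpa using this

theorem countBodies_alive (l : List Int) (p : Nat) (hp : p < (aliveIdx l 0).length) :
    countBodies l ((p : Int) + 1) = some (aliveIdx l 0)[p] := by
  have h1 := cbLoop_eq_cbScan l ((p : Int) + 1) 0 0 0 (l.length + 1) (by omega)
  have h2 := cbScan_alive l 0 0 p hp
  rw [countBodies]
  rw [show ((0 : Nat) : Int) = (0 : Int) from rfl] at h1
  rw [h1, List.drop_zero]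
  rw [show (0 : Int) + p + 1 = (p : Int) + 1 by ring] at h2
  exact h2

theorem highestBit_eq (c : Nat) (hc : 1 ≤ c) :
    (highestBit (c : Int)).1 = (2 : Int) ^ Nat.log2 c := by
  have key : ∀ (fuel n : Nat), n ≤ Nat.log2 c + 1 → Nat.log2 c + 2 ≤ n + fuel →
      hbLoop (c : Int) n fuel = ((2 : Int) ^ Nat.log2 c, ((Nat.log2 c + 1 : Nat) : Int)) := by
    intro fuel
    induction fuel with
    | zero => intro n h1 h2; omega
    | succ fuel ih =>
      intro n h1 h2
      rw [hbLoop]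
      by_cases hgt : (2 : Int) ^ n > (c : Int)
      · have hn : ¬ n ≤ Nat.log2 c := by
          intro hle
          have h3 := Nat.log2_self_le (by omega : c ≠ 0)
          have h4 : (2 : Nat) ^ n ≤ 2 ^ Nat.log2 c := Nat.pow_le_pow_right (by omega) hle
          have : ((2 : Nat) ^ n : Int) ≤ ((c : Nat) : Int) := by exact_mod_cast le_trans h4 h3
          push_cast at this
          omega
        have hn2 : n = Nat.log2 c + 1 := by omega
        rw [if_pos hgt, hn2,
          show PySem.Int.floordiv ((2 : Int) ^ (Nat.log2 c + 1)) 2 = (2 : Int) ^ Nat.log2 c by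
            rw [PySem.Int.floordiv_eq_ediv_of_pos (by omega), pow_succ]
            exact Int.mul_ediv_cancel _ (by omega)]
      · have hle : n ≤ Nat.log2 c := by
          by_contra hgt2
          have hn2 : Nat.log2 c + 1 ≤ n := by omega
          have h4 : (2 : Nat) ^ (Nat.log2 c + 1) ≤ 2 ^ n := Nat.pow_le_pow_right (by omega) hn2
          have h5 := Nat.lt_log2_self (n := c)
          have : (c : Int) < ((2 : Nat) ^ n : Nat) := by exact_mod_cast lt_of_lt_of_le h5 h4
          push_cast at this
          omega
        rw [if_neg hgt]
        exact ih (n + 1) (by omega) (by omega)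
  have hlog : Nat.log2 c < c := by
    have := Nat.lt_two_pow_self (n := c)
    exact (Nat.log2_lt (by omega)).2 this
  rw [highestBit, Int.toNat_natCast, key (c + 1) 0 (by omega) (by omega)]

theorem position_eq (c : Nat) (hc : 1 ≤ c) :
    position (highestBit (c : Int)).1 (c : Int) = ((2 * (c - 2 ^ Nat.log2 c) : Nat) : Int) + 1 := by
  rw [position, highestBit_eq c hc]
  have h3 := Nat.log2_self_le (by omega : c ≠ 0)
  have h5 := Nat.lt_log2_self (n := c)
  have hb : (0 : Int) < (2 : Int) ^ Nat.log2 c := by positivity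
  rw [PySem.Int.mod_eq_emod_of_pos hb]
  have hcast : ((2 ^ Nat.log2 c : Nat) : Int) ≤ (c : Int) := by exact_mod_cast h3
  push_cast at hcast
  have h5' : (c : Int) < 2 * 2 ^ Nat.log2 c := by
    have h6 : (c : Int) < ((2 ^ (Nat.log2 c + 1) : Nat) : Int) := by exact_mod_cast h5
    push_cast [pow_succ] at h6
    omega
  have hmod : (c : Int) % ((2 : Int) ^ Nat.log2 c) = (c : Int) - (2 : Int) ^ Nat.log2 c := by
    have hrw : (c : Int) = ((c : Int) - (2 : Int) ^ Nat.log2 c) + ((2 : Int) ^ Nat.log2 c) * 1 := by ring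
    conv_lhs => rw [hrw]
    rw [Int.add_mul_emod_self_left]
    exact Int.emod_eq_of_lt (by omega) (by omega)
  rw [hmod]
  rw [show ((2 * (c - 2 ^ Nat.log2 c) : Nat) : Int) = 2 * ((c : Int) - 2 ^ Nat.log2 c) by
    rw [Nat.cast_mul, Nat.cast_sub h3]; push_cast; ring]
  ring

theorem bitLength_sub_one (c : Nat) (hc : 1 ≤ c) :
    PySem.Int.bitLength (c : Int) - 1 = Nat.log2 c := by
  have hna : ((c : Int)).natAbs = c := Int.natAbs_natCast c
  have h1 := PySem.Int.two_pow_bitLength_le (c : Int) (Int.natCast_ne_zero.2 (by omega))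
  have h2 := PySem.Int.lt_two_pow_bitLength (c : Int)
  rw [hna] at h1 h2
  have h3 := Nat.log2_self_le (by omega : c ≠ 0)
  have h4 := Nat.lt_log2_self (n := c)
  set B := PySem.Int.bitLength (c : Int) with hB
  set L := Nat.log2 c with hL
  have hB1 : 1 ≤ B := by
    by_contra h
    have : B = 0 := by omega
    rw [this] at h2; simp at h2; omega
  have hle1 : B - 1 ≤ L := by
    by_contra h
    have : L + 1 ≤ B - 1 := by omega
    have := Nat.pow_le_pow_right (by omega : 1 ≤ 2) this
    omega
  have hle2 : L ≤ B - 1 := by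
    by_contra h
    have : B ≤ L := by omega
    have := Nat.pow_le_pow_right (by omega : 1 ≤ 2) this
    omega
  omega

theorem idx_lt (c : Nat) (hc : 1 ≤ c) : 2 * (c - 2 ^ Nat.log2 c) < c := by
  have h1 := Nat.log2_self_le (by omega : c ≠ 0)
  have h2 := Nat.lt_log2_self (n := c)
  have : 2 ^ (Nat.log2 c + 1) = 2 * 2 ^ Nat.log2 c := by ring
  omega

theorem sel_length (alive : List Int) (c : Nat) (h : c ≤ alive.length) :
    (sel alive c).length = c := by
  induction c generalizing alive with
  | zero => rfl
  | succ c ih =>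
    have hidx := idx_lt (c + 1) (by omega)
    rw [sel]
    have hlt : 2 * ((c + 1) - 2 ^ Nat.log2 (c + 1)) < alive.length := by omega
    simp only [hlt, dif_pos]
    have hlen : (alive.eraseIdx (2 * ((c + 1) - 2 ^ Nat.log2 (c + 1)))).length = alive.length - 1 :=
      List.length_eraseIdx_of_lt hlt
    simp only [List.length_cons, ih _ (by omega : c ≤ (alive.eraseIdx (2 * ((c + 1) - 2 ^ Nat.log2 (c + 1)))).length)]

theorem sel_subset (alive : List Int) (c : Nat) : ∀ t ∈ sel alive c, t ∈ alive := by
  induction c generalizing alive with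
  | zero => simp [sel]
  | succ c ih =>
    intro t ht
    rw [sel] at ht
    split at ht
    · rcases (List.mem_cons.1 ht) with rfl | ht
      · exact List.getElem_mem _
      · exact List.eraseIdx_subset (ih _ t ht)
    · simp at ht

theorem not_mem_eraseIdx_of_nodup (l : List Int) (i : Nat) (hn : l.Nodup) (hi : i < l.length) :
    l[i] ∉ l.eraseIdx i := by
  intro hmem
  rw [List.mem_eraseIdx_iff_getElem] at hmem
  obtain ⟨j, hj, hne, heq⟩ := hmem
  exact hne ((List.Nodup.getElem_inj_iff hn).1 heq)

theorem sel_nodup (alive : List Int) (c : Nat) (hn : alive.Nodup) : (sel alive c).Nodup := by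
  induction c generalizing alive with
  | zero => simp [sel]
  | succ c ih =>
    rw [sel]
    split
    · refine List.Pairwise.cons ?_ (ih _ ((List.eraseIdx_sublist _ _).nodup hn))
      intro t ht h
      subst h
      exact not_mem_eraseIdx_of_nodup _ _ hn (by assumption) (sel_subset _ _ _ ht)
    · simp

theorem sel_nonneg (alive : List Int) (c : Nat) (h0 : ∀ t ∈ alive, 0 ≤ t) :
    ∀ t ∈ sel alive c, 0 ≤ t := by
  intro t ht; exact h0 t (sel_subset _ _ _ ht)

-- A's main loop computes sel, shifted by one
theorem unJoLoop_eq_sel (c : Nat) (tl : List Int) (i : Int) (acc : List Int)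
    (h : c ≤ (aliveIdx tl 0).length) :
    unJoLoop (i + c) tl acc i c = some (acc ++ (sel (aliveIdx tl 0) c).map (· + 1)) := by
  induction c generalizing tl i acc with
  | zero => simp [unJoLoop, sel]
  | succ c ih =>
    rw [unJoLoop]
    have hidx : 2 * ((c + 1) - 2 ^ Nat.log2 (c + 1)) < c + 1 := idx_lt (c + 1) (by omega)
    have hlt : 2 * ((c + 1) - 2 ^ Nat.log2 (c + 1)) < (aliveIdx tl 0).length := by omega
    have hcur : i + ((c + 1 : Nat) : Int) - i = ((c + 1 : Nat) : Int) := by ring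
    have hpos := position_eq (c + 1) (by omega)
    have hcb := countBodies_alive tl (2 * ((c + 1) - 2 ^ Nat.log2 (c + 1))) hlt
    simp only [hcur, hpos, hcb]
    have ht0 : 0 ≤ (aliveIdx tl 0)[2 * ((c + 1) - 2 ^ Nat.log2 (c + 1))] :=
      aliveIdx_le tl 0 _ (List.getElem_mem hlt)
    have hset := aliveIdx_set tl 0 (2 * ((c + 1) - 2 ^ Nat.log2 (c + 1))) hlt
    rw [sub_zero] at hset
    have hnum : i + ((c + 1 : Nat) : Int) = (i + 1) + ((c : Nat) : Int) := by push_cast; ring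
    rw [hnum, ih _ _ _ (by rw [hset, List.length_eraseIdx_of_lt hlt]; omega), hset]
    rw [sel, dif_pos hlt]
    simp

-- B's main loop computes place over sel
theorem altLoop_eq_place (cs : List Char) (n : Nat) (c i : Nat) (alive : List Int)
    (res : List (Option Char)) (hi : i + c = n) (h : c ≤ alive.length) :
    altLoop cs n alive res i c = place n cs res (sel alive c) i := by
  induction c generalizing alive res i with
  | zero => simp [altLoop, sel, place]
  | succ c ih =>
    rw [altLoop]
    have h3 := Nat.log2_self_le (by omega : c + 1 ≠ 0)
    have hcur : ((n : Int) - (i : Int)) = ((c + 1 : Nat) : Int) := by push_cast; omega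
    have hbl := bitLength_sub_one (c + 1) (by omega)
    have hidx : 2 * ((c + 1) - 2 ^ Nat.log2 (c + 1)) < c + 1 := idx_lt (c + 1) (by omega)
    have hlt : 2 * ((c + 1) - 2 ^ Nat.log2 (c + 1)) < alive.length := by omega
    have hposidx : (1 : Int) + 2 * (((c + 1 : Nat) : Int) - 2 ^ Nat.log2 (c + 1)) - 1
        = ((2 * ((c + 1) - 2 ^ Nat.log2 (c + 1)) : Nat) : Int) := by
      rw [Nat.cast_mul, Nat.cast_sub h3]; push_cast; ring
    rw [hcur, hbl, hposidx, PySem.List.pop?_natCast alive _ hlt]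
    rw [sel, dif_pos hlt, place]
    exact ih _ _ _ (by omega) (by rw [List.length_eraseIdx_of_lt hlt]; omega)

theorem map_getD_range {α : Type} (l : List α) (d : α) :
    (List.range l.length).map (fun i => l.getD i d) = l := by
  apply List.ext_getElem
  · simp
  · intro i h1 h2
    simp [List.getD_eq_getElem?_getD, List.getElem?_eq_getElem h2]

theorem codeList_eq (l : List Char) :
    (List.range l.length).foldl (fun acc i => acc ++ [l.getD i ' ']) [] = l := by
  rw [PySem.List.foldl_append_singleton_eq_map]
  simpa using map_getD_range l ' '

theorem join_eq_flatMap (res : List (Option Char)) (acc : List Char) :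
    res.foldl (fun acc o => match o with | some c => acc ++ [c] | none => acc) acc
      = acc ++ res.flatMap Option.toList := by
  induction res generalizing acc with
  | nil => simp
  | cons o res ih => cases o <;> simp [List.foldl_cons, ih]

theorem foldl_ite_append {α : Type} (l : List ℕ) (P : ℕ → Prop) [DecidablePred P]
    (f : ℕ → α) (acc : List α) :
    l.foldl (fun acc j => if P j then acc ++ [f j] else acc) acc
      = acc ++ (l.filter (fun j => decide (P j))).map f := by
  induction l generalizing acc with
  | nil => simp
  | cons j l ih =>
    by_cases h : P j <;> simp [List.foldl_cons, h, ih]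

theorem place_length (n : Nat) (cs : List Char) (ts : List Int) (res : List (Option Char)) (i : Nat) :
    (place n cs res ts i).length = res.length := by
  induction ts generalizing res i with
  | nil => rfl
  | cons t ts ih =>
    rw [place, ih]
    split <;> simp

theorem place_getD (n : Nat) (cs : List Char) (ts : List Int) (res : List (Option Char))
    (i q : Nat) (hn : ts.Nodup) (h0 : ∀ t ∈ ts, 0 ≤ t) (hq : q < n) (hql : q < res.length) :
    (place n cs res ts i).getD q none
      = match PySem.List.index? ts ((q : Nat) : Int) with
        | some j => some (cs.getD (i + j) ' ')
        | none => res.getD q none := by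
  induction ts generalizing res i with
  | nil => simp [place, PySem.List.index?]
  | cons t ts ih =>
    rw [place]
    by_cases ht : t = ((q : Nat) : Int)
    · subst ht
      rw [PySem.List.index?_cons_self]
      have hnotmem : ((q : Nat) : Int) ∉ ts := (List.nodup_cons.1 hn).1
      have hnone : PySem.List.index? ts ((q : Nat) : Int) = none :=
        (PySem.List.index?_eq_none_iff _ _).2 hnotmem
      rw [ih _ _ (List.nodup_cons.1 hn).2 (fun t h => h0 t (List.mem_cons_of_mem _ h)) ?_, hnone]
      · rw [if_pos (by exact_mod_cast hq), Int.toNat_natCast]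
        simp [List.getD_eq_getElem?_getD, List.getElem?_set_self', List.getElem?_eq_getElem hql]
      · split <;> simp [hql]
    · rw [PySem.List.index?_cons_of_ne _ ht]
      have hres' : ∀ res' : List (Option Char), res'.length = res.length →
          res'.getD q none = res.getD q none → (place n cs res' ts (i + 1)).getD q none
            = match PySem.List.index? ts ((q : Nat) : Int) with
              | some j => some (cs.getD ((i + 1) + j) ' ')
              | none => res.getD q none := by
        intro res' hl he
        rw [ih _ _ (List.nodup_cons.1 hn).2 (fun t h => h0 t (List.mem_cons_of_mem _ h)) (hl ▸ hql)]
        cases PySem.List.index? ts ((q : Nat) : Int) with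
        | none => simpa using he
        | some j => rfl
      have hmain : (place n cs (if t < (n : Int) then res.set t.toNat (some (cs.getD i ' ')) else res)
          ts (i + 1)).getD q none
            = match PySem.List.index? ts ((q : Nat) : Int) with
              | some j => some (cs.getD ((i + 1) + j) ' ')
              | none => res.getD q none := by
        apply hres'
        · split <;> simp
        · split
          · have h0t : 0 ≤ t := h0 t List.mem_cons_self
            have : t.toNat ≠ q := by
              intro hEq
              apply ht
              omega
            simp [List.getD_eq_getElem?_getD, List.getElem?_set_ne this]
          · rfl
      rw [hmain]
      cases PySem.List.index? ts ((q : Nat) : Int) with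
      | none => simp
      | some j =>
        simp only [Option.map_some]
        rw [show i + 1 + j = i + (j + 1) by omega]

theorem filter_range_getD (ts : List Int) (q : Int) (hn : ts.Nodup) :
    (List.range ts.length).filter (fun j => decide (ts.getD j 0 = q))
      = (PySem.List.index? ts q).toList := by
  induction ts with
  | nil => simp [PySem.List.index?]
  | cons t ts ih =>
    rw [List.length_cons, List.range_succ_eq_map, List.filter_cons, List.filter_map]
    have hpred : (List.range ts.length).filter ((fun j => decide ((t :: ts).getD j 0 = q)) ∘ (· + 1))
        = (List.range ts.length).filter (fun j => decide (ts.getD j 0 = q)) := by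
      apply List.filter_congr
      intro j _
      simp [Function.comp]
    rw [hpred]
    by_cases ht : t = q
    · subst ht
      have hnotmem : t ∉ ts := (List.nodup_cons.1 hn).1
      rw [PySem.List.index?_cons_self]
      have hnil : (List.range ts.length).filter (fun j => decide (ts.getD j 0 = t)) = [] := by
        rw [List.filter_eq_nil_iff]
        intro j hj
        rw [List.mem_range] at hj
        simp only [decide_eq_true_eq]
        intro hEq
        exact hnotmem (hEq ▸ (List.getD_eq_getElem ts 0 hj ▸ List.getElem_mem hj))
      simp only [List.getD_cons_zero, decide_true, if_true, hnil, List.map_nil,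
        Option.toList_some]
    · rw [PySem.List.index?_cons_of_ne _ ht, ih (List.nodup_cons.1 hn).2]
      simp only [List.getD_cons_zero, ht, decide_false, Bool.false_eq_true, if_false]
      cases PySem.List.index? ts q <;> simp

theorem flatMap_congr_mem {α β : Type} (l : List α) (f g : α → List β)
    (h : ∀ x ∈ l, f x = g x) : l.flatMap f = l.flatMap g := by
  induction l with
  | nil => rfl
  | cons x l ih =>
    rw [List.flatMap_cons, List.flatMap_cons, h x List.mem_cons_self,
      ih (fun y hy => h y (List.mem_cons_of_mem _ hy))]

-- ===== VERDICT (by name: the statement is the Claim_ definition above) =====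
theorem unJo_spec : Claim_equal_unJo := by
  intro s tl _ hpre
  show unJo s tl = unJo_alt s tl
  rw [unJo, unJo_alt]
  have hal : s.toList.length ≤ (aliveIdx tl 0).length := by
    rw [aliveIdx_length]; exact hpre
  have hloop := unJoLoop_eq_sel s.toList.length tl 0 [] hal
  rw [zero_add] at hloop
  rw [hloop, codeList_eq, enum_alive,
    altLoop_eq_place s.toList s.toList.length s.toList.length 0 _ _ (by omega) hal,
    join_eq_flatMap, List.nil_append]
  have hnodup : (sel (aliveIdx tl 0) s.toList.length).Nodup :=
    sel_nodup _ _ ((aliveIdx_pairwise tl 0).imp (fun h => ne_of_lt h))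
  have hnn : ∀ t ∈ sel (aliveIdx tl 0) s.toList.length, 0 ≤ t :=
    sel_nonneg _ _ (aliveIdx_le tl 0)
  set cs := s.toList with hcs
  set n := cs.length with hn
  set ts := sel (aliveIdx tl 0) n with hts
  have hlts : ts.length = n := sel_length _ _ hal
  have hmap : (ts.map (· + 1)).length = n := by simp [hlts]
  set resf := place n cs (List.replicate n (none : Option Char)) ts 0 with hresf
  have hlresf : resf.length = n := by
    rw [hresf, place_length]; simp
  -- A's final double loop to flatMap over gathered indices
  simp only [List.nil_append, hmap]
  have hinner : ∀ (i : ℕ) (acc : List Char),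
      (List.range n).foldl (fun acc2 j =>
        if (ts.map (· + 1)).getD j 0 = (i : Int) + 1 then acc2 ++ [cs.getD j ' '] else acc2) acc
      = acc ++ ((PySem.List.index? ts ((i : Nat) : Int)).toList).map (fun j => cs.getD j ' ') := by
    intro i acc
    rw [foldl_ite_append (List.range n) (fun j => (ts.map (· + 1)).getD j 0 = (i : Int) + 1)
      (fun j => cs.getD j ' ') acc]
    congr 1
    rw [List.filter_congr (fun j hj => ?_), ← hlts,
      filter_range_getD ts ((i : Nat) : Int) hnodup]
    rw [List.mem_range] at hj
    have hj' : j < ts.length := by omega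
    rw [List.getD_eq_getElem _ _ (by simpa using hj'), List.getElem_map,
      List.getD_eq_getElem _ _ hj']
    simp only [decide_eq_decide]
    omega
  simp only [hinner]
  rw [PySem.List.foldl_append_eq_flatMap, List.nil_append]
  -- B's join to flatMap over positions
  have hres_eq : resf = (List.range resf.length).map (fun q => resf.getD q none) :=
    (map_getD_range resf none).symm
  conv_rhs => rw [hres_eq, List.flatMap_map]
  rw [hlresf]
  congr 1
  apply flatMap_congr_mem
  intro q hq
  rw [List.mem_range] at hq
  rw [place_getD n cs ts _ 0 q hnodup hnn hq (by simpa using hq)]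
  cases PySem.List.index? ts ((q : Nat) : Int) with
  | none =>
    simp [List.getD_eq_getElem?_getD, hq]
  | some j => simp
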